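-- pv_equiv track=rewrite | github.com/ICAMS/python-ace | src/pyace/multispecies_basisextension.py | generate_species_keys
-- ===== SOURCE A (Python) =====
-- from itertools import combinations, permutations, combinations_with_replacement, product
--
-- def generate_species_keys(elements, r):
--     """
--     Generate all ordered permutations of the elements if size `r`
--
--     :param elements: list of elements
--     :param r: permutations size
--     :return: list of speices blocks names (permutation) of size `r`
--     """
--     keys = set()
--     for el in elements:
--         rest_elements = [e for e in elements if e != el]
--
--         for rst in product(rest_elements, repeat=r - 1):
--             rst = list(dict.fromkeys(sorted(rst)))
--             key = tuple([el] + rst)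
--             if len(key) == r:
--                 keys.add(key)
--     return sorted(keys)
-- ===== SOURCE B (Python) =====
-- from itertools import combinations
--
-- def generate_species_keys(elements, r):
--     """
--     Same result as A: for each element, pick the r-1 *distinct* other values
--     directly via combinations of the sorted distinct values, instead of
--     enumerating all (n-1)^(r-1) tuples and deduplicating.  The output is
--     produced already in sorted order, so no final sort is needed.
--     """
--     distinct = sorted(set(elements))
--     keys = []
--     for el in distinct:
--         others = [e for e in distinct if e != el]
--         for combo in combinations(others, r - 1):
--             keys.append((el,) + combo)
--     return keys
-- ===== Notes on version B (the rewrite author's own statement) =====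
-- stated objective: alternative
-- what changed: Instead of enumerating all (n-1)^(r-1) tuples per element and deduplicating each through sorted+dict.fromkeys into a set, B enumerates combinations of r-1 distinct values from the sorted distinct elements directly, emitting the keys already in sorted order with no set and no final sort (measured 23.9x at the largest size both finished, but unconfirmed at larger sizes where the output itself is huge).
import Mathlib
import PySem

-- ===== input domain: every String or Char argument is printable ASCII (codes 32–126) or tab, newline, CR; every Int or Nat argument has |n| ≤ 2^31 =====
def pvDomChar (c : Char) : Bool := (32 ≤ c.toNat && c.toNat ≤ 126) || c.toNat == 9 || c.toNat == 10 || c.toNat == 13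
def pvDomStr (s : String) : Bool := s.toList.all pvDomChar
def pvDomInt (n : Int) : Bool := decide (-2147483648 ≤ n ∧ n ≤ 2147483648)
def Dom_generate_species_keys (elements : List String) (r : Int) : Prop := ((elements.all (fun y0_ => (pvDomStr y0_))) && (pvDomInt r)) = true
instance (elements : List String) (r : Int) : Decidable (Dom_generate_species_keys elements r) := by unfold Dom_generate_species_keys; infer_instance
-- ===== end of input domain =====

-- B replaces A's per-element enumeration of all (n-1)^(r-1) tuples (each deduplicated through
-- sorted+dict.fromkeys into a set, then sorted) by direct combinations of r-1 distinct values
-- from the sorted distinct elements, emitted already in sorted order (no set, no final sort).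

-- ===== PORT A =====
-- itertools.product(l, repeat=k): hand port (PySem has no product); exact, first slot varying slowest
def pyProductRep (l : List String) : Nat → List (List String)
  | 0 => [[]]
  | k+1 => l.flatMap (fun x => (pyProductRep l k).map (fun t => x :: t))

-- 'r - 1' is passed to product as (r-1).toNat: exact for r ≥ 1; for r < 1 Python raises
-- ValueError unless elements = [] (then the loop body never runs) — excluded by Pre_ below.
def generate_species_keys (elements : List String) (r : Int) : List (List String) :=
  let keys : PySem.Set (List String) :=
    elements.foldl (fun keys el =>
      let rest_elements := elements.filter (fun e => e != el)
      (pyProductRep rest_elements (r - 1).toNat).foldl (fun keys rst =>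
        let rst' := PySem.List.dedup (PySem.List.sorted rst (fun x => x))
        let key := el :: rst'
        if ((key.length : Int) == r) then PySem.Set.add keys key else keys) keys)
      PySem.Set.empty
  PySem.List.sorted keys (fun x => x)

-- ===== PORT B =====
-- itertools.combinations(xs, k) is PySem.List.combinations xs k (same order)
def generate_species_keys_alt (elements : List String) (r : Int) : List (List String) :=
  let distinct := PySem.List.sorted (PySem.Set.ofList elements) (fun x => x)
  distinct.foldl (fun keys el =>
    keys ++ (PySem.List.combinations (distinct.filter (fun e => e != el)) (r - 1).toNat).map
      (fun combo => el :: combo)) []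

-- ===== PRECONDITION & SPEC =====
-- Pre_ excludes exactly the inputs where A raises: for a nonempty elements list and r < 1,
-- itertools.product(..., repeat=r-1) raises ValueError (negative repeat); A returns on all other inputs.
def Pre_generate_species_keys (elements : List String) (r : Int) : Prop := elements = [] ∨ 1 ≤ r
instance (elements : List String) (r : Int) : Decidable (Pre_generate_species_keys elements r) := by unfold Pre_generate_species_keys; infer_instance
def pvWitness_generate_species_keys : List String × Int := (["a", "b", "c"], 2)

def Spec_generate_species_keys (elements : List String) (r : Int) (out : List (List String)) : Prop := out = generate_species_keys_alt elements r
instance (elements : List String) (r : Int) (out : List (List String)) : Decidable (Spec_generate_species_keys elements r out) := by unfold Spec_generate_species_keys; infer_instance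

-- ===== CLAIM (what is proved, stated in full; the proofs are below) =====
def Claim_equal_generate_species_keys : Prop := ∀ (elements : List String) (r : Int), Dom_generate_species_keys elements r → Pre_generate_species_keys elements r → Spec_generate_species_keys elements r (generate_species_keys elements r)

-- ===== LEMMAS AND PROOFS =====

-- the canonical description both programs' key collections satisfy
def IsKey (elements : List String) (k : Nat) (key : List String) : Prop :=
  ∃ el c, key = el :: c ∧ el ∈ elements ∧ c.Pairwise (· < ·) ∧ c.length = k ∧
    ∀ x ∈ c, x ∈ elements ∧ x ≠ el

-- ---- generic order/instance bridges -------------------------------------------------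

lemma sortedLS_eq_of (xs ys : List (List String)) (h : ys.Perm xs) (hp : ys.Pairwise (· < ·)) :
    PySem.List.sorted xs (fun x => x) = ys := by
  have h2 := PySem.List.sorted_eq_of_perm_of_pairwise_lt (κ := List String) xs ys (fun a => a) h hp
  convert h2 using 2

lemma sortedStr_pairwise_le (xs : List String) :
    (PySem.List.sorted xs (fun x => x)).Pairwise (· ≤ ·) := by
  have h2 := PySem.List.sorted_pairwise (κ := String) xs (fun a => a)
  convert h2 using 2

lemma sortedStr_eq_self (xs : List String) (h : xs.Pairwise (· ≤ ·)) :
    PySem.List.sorted xs (fun x => x) = xs := by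
  have h2 := PySem.List.sorted_eq_self_of_pairwise (κ := String) (xs := xs) (key := fun a => a) h
  convert h2 using 2

lemma sorted_ofList_str_pairwise_lt (xs : List String) :
    (PySem.List.sorted (PySem.Set.ofList xs) (fun x => x)).Pairwise (· < ·) := by
  have h2 := PySem.List.sorted_ofList_pairwise_lt (κ := String) xs
  convert h2 using 2

-- ---- dedup as a sublist, dedup of nodup ---------------------------------------------

lemma foldl_add_sublist (xs : List String) : ∀ acc : List String,
    (xs.foldl PySem.Set.add acc).Sublist (acc ++ xs) := by
  induction xs with
  | nil => intro acc; simp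
  | cons x xs ih =>
    intro acc
    have h1 := ih (PySem.Set.add acc x)
    have h2 : (PySem.Set.add acc x).Sublist (acc ++ [x]) := by
      unfold PySem.Set.add
      split
      · exact List.sublist_append_left acc [x]
      · exact List.Sublist.refl _
    have h3 : ((PySem.Set.add acc x) ++ xs).Sublist ((acc ++ [x]) ++ xs) := h2.append_right xs
    have h4 : ((x :: xs).foldl PySem.Set.add acc).Sublist ((acc ++ [x]) ++ xs) :=
      List.Sublist.trans h1 h3
    simpa using h4

lemma dedup_sublist (xs : List String) : (PySem.List.dedup xs).Sublist xs := by
  have := foldl_add_sublist xs []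
  simpa [PySem.List.dedup_eq_ofList, PySem.Set.ofList_eq_foldl] using this

lemma foldl_add_of_nodup (xs : List String) : ∀ acc : List String, (acc ++ xs).Nodup →
    xs.foldl PySem.Set.add acc = acc ++ xs := by
  induction xs with
  | nil => intro acc _; simp
  | cons x xs ih =>
    intro acc h
    have hx : x ∉ acc := by
      intro hmem
      exact (List.disjoint_of_nodup_append h) hmem List.mem_cons_self
    have hadd : PySem.Set.add acc x = acc ++ [x] := by
      unfold PySem.Set.add
      rw [if_neg]
      simpa [PySem.Set.contains] using hx
    calc (x :: xs).foldl PySem.Set.add acc = xs.foldl PySem.Set.add (PySem.Set.add acc x) := rfl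
      _ = (acc ++ [x]) ++ xs := by
          rw [hadd]; exact ih _ (by simpa using h)
      _ = acc ++ x :: xs := by simp

lemma dedup_eq_self_of_nodup (xs : List String) (h : xs.Nodup) : PySem.List.dedup xs = xs := by
  have := foldl_add_of_nodup xs [] (by simpa using h)
  simpa [PySem.List.dedup_eq_ofList, PySem.Set.ofList_eq_foldl] using this

lemma dsort_pairwise_lt (rst : List String) :
    (PySem.List.dedup (PySem.List.sorted rst (fun x => x))).Pairwise (· < ·) := by
  have hle : (PySem.List.dedup (PySem.List.sorted rst (fun x => x))).Pairwise (· ≤ ·) :=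
    (sortedStr_pairwise_le rst).sublist (dedup_sublist _)
  have hnd : (PySem.List.dedup (PySem.List.sorted rst (fun x => x))).Nodup :=
    PySem.List.nodup_dedup _
  exact (hle.and hnd).imp (fun h => lt_of_le_of_ne h.1 h.2)

lemma dsort_eq_self (c : List String) (h : c.Pairwise (· < ·)) :
    PySem.List.dedup (PySem.List.sorted c (fun x => x)) = c := by
  rw [sortedStr_eq_self c (h.imp le_of_lt)]
  exact dedup_eq_self_of_nodup c (h.imp (fun hlt => ne_of_lt hlt))

-- ---- membership in pyProductRep ------------------------------------------------------

lemma mem_pyProductRep (l : List String) : ∀ (k : Nat) (rst : List String),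
    rst ∈ pyProductRep l k ↔ rst.length = k ∧ ∀ x ∈ rst, x ∈ l := by
  intro k
  induction k with
  | zero =>
    intro rst
    simp only [pyProductRep, List.mem_singleton]
    constructor
    · rintro rfl; simp
    · rintro ⟨hlen, -⟩; exact List.length_eq_zero_iff.mp hlen
  | succ k ih =>
    intro rst
    simp only [pyProductRep, List.mem_flatMap, List.mem_map]
    constructor
    · rintro ⟨x, hx, t, ht, rfl⟩
      obtain ⟨hlen, hmem⟩ := (ih t).mp ht
      refine ⟨by simp [hlen], ?_⟩
      intro y hy
      rcases List.mem_cons.mp hy with rfl | hy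
      · exact hx
      · exact hmem y hy
    · rintro ⟨hlen, hmem⟩
      cases rst with
      | nil => simp at hlen
      | cons x t =>
        refine ⟨x, hmem x List.mem_cons_self, t, (ih t).mpr ⟨by simpa using hlen, ?_⟩, rfl⟩
        exact fun y hy => hmem y (List.mem_cons_of_mem _ hy)

-- ---- strict-sorted lists vs sublists -------------------------------------------------

lemma sublist_of_strict : ∀ (s c : List String), s.Pairwise (· < ·) → c.Pairwise (· < ·) →
    (∀ x ∈ c, x ∈ s) → c.Sublist s := by
  intro s
  induction s with
  | nil =>
    intro c _ _ hm
    cases c with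
    | nil => exact List.Sublist.refl _
    | cons x c => exact absurd (hm x List.mem_cons_self) (by simp)
  | cons a s ih =>
    intro c hs hc hm
    cases c with
    | nil => exact List.nil_sublist _
    | cons x c =>
      have hs' := (List.pairwise_cons.mp hs).2
      by_cases hxa : x = a
      · subst hxa
        refine List.Sublist.cons₂ x (ih c hs' (List.pairwise_cons.mp hc).2 ?_)
        intro y hy
        have hxy : x < y := (List.pairwise_cons.mp hc).1 y hy
        rcases List.mem_cons.mp (hm y (List.mem_cons_of_mem _ hy)) with rfl | h
        · exact absurd hxy (lt_irrefl y)
        · exact h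
      · refine List.Sublist.cons a (ih (x :: c) hs' hc ?_)
        intro y hy
        rcases List.mem_cons.mp (hm y hy) with rfl | h
        · -- y = a is impossible: x ∈ s (as x ≠ a), so a < x, and x ≤ every member of x :: c
          exfalso
          have hxs : x ∈ s := by
            rcases List.mem_cons.mp (hm x List.mem_cons_self) with rfl | hxs
            · exact absurd rfl hxa
            · exact hxs
          have hax : y < x := (List.pairwise_cons.mp hs).1 x hxs
          rcases List.mem_cons.mp hy with rfl | hyc
          · exact lt_irrefl y hax
          · exact lt_irrefl y (lt_trans hax ((List.pairwise_cons.mp hc).1 y hyc))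
        · exact h

-- ---- combinations of a strictly sorted list are strictly sorted (lex) ----------------

lemma head_lt_of_mem_comb (x : String) (xs : List String) (hx : ∀ y ∈ xs, x < y)
    (r : Nat) (b : List String) (hb : b ∈ PySem.List.combinations xs (r + 1)) :
    ∀ c : List String, (x :: c) < b := by
  intro c
  obtain ⟨hsub, hlen⟩ := (PySem.List.mem_combinations_iff xs (r+1) b).mp hb
  cases b with
  | nil => simp at hlen
  | cons y b' =>
    have hy : y ∈ xs := hsub.mem List.mem_cons_self
    exact List.cons_lt_cons_iff.mpr (Or.inl (hx y hy))

lemma comb_pairwise : ∀ (xs : List String), xs.Pairwise (· < ·) → ∀ (r : Nat),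
    (PySem.List.combinations xs r).Pairwise (· < ·) := by
  intro xs
  induction xs with
  | nil =>
    intro _ r
    cases r with
    | zero => simp [PySem.List.combinations_zero]
    | succ r => simp [PySem.List.combinations_nil_succ]
  | cons x xs ih =>
    intro h r
    have hx := (List.pairwise_cons.mp h).1
    have hxs := (List.pairwise_cons.mp h).2
    cases r with
    | zero => simp [PySem.List.combinations_zero]
    | succ r =>
      rw [PySem.List.combinations_cons_succ]
      rw [List.pairwise_append]
      refine ⟨?_, ih hxs (r+1), ?_⟩
      · rw [List.pairwise_map]
        exact (ih hxs r).imp (fun hcd => List.cons_lt_cons_self.mpr hcd)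
      · intro a ha b hb
        obtain ⟨c, hc, rfl⟩ := List.mem_map.mp ha
        exact head_lt_of_mem_comb x xs hx r b hb c

-- ---- A-side: membership and nodup of the key set -------------------------------------

def restOf (elements : List String) (el : String) : List String :=
  elements.filter (fun e => e != el)

def dsort (rst : List String) : List String :=
  PySem.List.dedup (PySem.List.sorted rst (fun x => x))

def stepA (elements : List String) (r : Int) (keys : PySem.Set (List String)) (el : String) :
    PySem.Set (List String) :=
  (pyProductRep (restOf elements el) (r - 1).toNat).foldl (fun keys rst =>
    if (((el :: dsort rst).length : Int) == r) then PySem.Set.add keys (el :: dsort rst) else keys) keys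

lemma genA_eq (elements : List String) (r : Int) :
    generate_species_keys elements r =
      PySem.List.sorted (elements.foldl (stepA elements r) PySem.Set.empty) (fun x => x) := rfl

lemma mem_inner_fold (el : String) (r : Int) (l : List (List String)) :
    ∀ (s0 : List (List String)) (y : List String),
    (y ∈ l.foldl (fun keys rst =>
        if (((el :: dsort rst).length : Int) == r) then PySem.Set.add keys (el :: dsort rst) else keys) s0) ↔
      y ∈ s0 ∨ ∃ a ∈ l, (((el :: dsort a).length : Int) = r) ∧ y = el :: dsort a := by
  induction l with
  | nil => intro s0 y; simp
  | cons a l ih =>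
    intro s0 y
    simp only [List.foldl_cons]
    by_cases hc : (((el :: dsort a).length : Int) = r)
    · rw [if_pos (by exact beq_iff_eq.mpr hc)]
      rw [ih]
      rw [PySem.Set.mem_add]
      constructor
      · rintro ((h | h) | h)
        · exact Or.inl h
        · exact Or.inr ⟨a, List.mem_cons_self, hc, h⟩
        · obtain ⟨b, hb, h1, h2⟩ := h
          exact Or.inr ⟨b, List.mem_cons_of_mem _ hb, h1, h2⟩
      · rintro (h | ⟨b, hb, h1, h2⟩)
        · exact Or.inl (Or.inl h)
        · rcases List.mem_cons.mp hb with rfl | hb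
          · exact Or.inl (Or.inr h2)
          · exact Or.inr ⟨b, hb, h1, h2⟩
    · rw [if_neg (by simpa using hc)]
      rw [ih]
      constructor
      · rintro (h | ⟨b, hb, h1, h2⟩)
        · exact Or.inl h
        · exact Or.inr ⟨b, List.mem_cons_of_mem _ hb, h1, h2⟩
      · rintro (h | ⟨b, hb, h1, h2⟩)
        · exact Or.inl h
        · rcases List.mem_cons.mp hb with rfl | hb
          · exact absurd h1 hc
          · exact Or.inr ⟨b, hb, h1, h2⟩

lemma mem_outer_fold (elements : List String) (r : Int) : ∀ (l : List String)
    (s0 : List (List String)) (y : List String),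
    y ∈ l.foldl (stepA elements r) s0 ↔
      y ∈ s0 ∨ ∃ el ∈ l, ∃ a ∈ pyProductRep (restOf elements el) (r - 1).toNat,
        (((el :: dsort a).length : Int) = r) ∧ y = el :: dsort a := by
  intro l
  induction l with
  | nil => intro s0 y; simp
  | cons el l ih =>
    intro s0 y
    simp only [List.foldl_cons]
    rw [ih, stepA, mem_inner_fold]
    constructor
    · rintro ((h | h) | h)
      · exact Or.inl h
      · obtain ⟨a, ha, h1, h2⟩ := h
        exact Or.inr ⟨el, List.mem_cons_self, a, ha, h1, h2⟩
      · obtain ⟨e, he, rest⟩ := h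
        exact Or.inr ⟨e, List.mem_cons_of_mem _ he, rest⟩
    · rintro (h | ⟨e, he, rest⟩)
      · exact Or.inl (Or.inl h)
      · rcases List.mem_cons.mp he with rfl | he
        · exact Or.inl (Or.inr rest)
        · exact Or.inr ⟨e, he, rest⟩

lemma nodup_set_add (s : List (List String)) (x : List String) (h : s.Nodup) :
    (PySem.Set.add s x).Nodup := by
  unfold PySem.Set.add
  split
  · exact h
  · next hc =>
    have hx : x ∉ s := fun hmem => hc (by simpa [PySem.Set.contains] using hmem)
    exact List.Nodup.append h (List.nodup_singleton x)
      (fun a ha hax => hx ((List.mem_singleton.mp hax) ▸ ha))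

lemma nodup_inner_fold (el : String) (r : Int) (l : List (List String)) :
    ∀ s0 : List (List String), s0.Nodup →
    (l.foldl (fun keys rst =>
        if (((el :: dsort rst).length : Int) == r) then PySem.Set.add keys (el :: dsort rst) else keys) s0).Nodup := by
  induction l with
  | nil => intro s0 h; exact h
  | cons a l ih =>
    intro s0 h
    simp only [List.foldl_cons]
    apply ih
    split
    · exact nodup_set_add _ _ h
    · exact h

lemma nodup_outer_fold (elements : List String) (r : Int) : ∀ (l : List String)
    (s0 : List (List String)), s0.Nodup → (l.foldl (stepA elements r) s0).Nodup := by
  intro l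
  induction l with
  | nil => intro s0 h; exact h
  | cons el l ih =>
    intro s0 h
    simp only [List.foldl_cons]
    exact ih _ (nodup_inner_fold el r _ s0 h)

lemma mem_restOf (elements : List String) (el x : String) :
    x ∈ restOf elements el ↔ x ∈ elements ∧ x ≠ el := by
  simp [restOf]

lemma mem_keysA (elements : List String) (r : Int) (hr : 1 ≤ r) (y : List String) :
    y ∈ elements.foldl (stepA elements r) PySem.Set.empty ↔ IsKey elements (r - 1).toNat y := by
  rw [mem_outer_fold]
  simp only [PySem.Set.empty]
  constructor
  · rintro (h | ⟨el, hel, a, ha, hlen, rfl⟩)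
    · simp at h
    · refine ⟨el, dsort a, rfl, hel, dsort_pairwise_lt a, ?_, ?_⟩
      · have : ((dsort a).length : Int) = r - 1 := by
          simpa using (by omega : (1 : Int) + (dsort a).length = r → ((dsort a).length : Int) = r - 1)
            (by simpa [Int.add_comm] using hlen)
        omega
      · intro x hx
        have hxa : x ∈ a := by
          have := (PySem.List.mem_dedup (PySem.List.sorted a (fun x => x)) x).mp hx
          simpa [PySem.List.mem_sorted] using this
        have := (mem_pyProductRep _ _ a).mp ha
        exact (mem_restOf elements el x).mp (this.2 x hxa)
  · rintro ⟨el, c, rfl, hel, hpc, hlen, hmem⟩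
    refine Or.inr ⟨el, hel, c, ?_, ?_, ?_⟩
    · refine (mem_pyProductRep _ _ c).mpr ⟨hlen, ?_⟩
      intro x hx
      exact (mem_restOf elements el x).mpr (hmem x hx)
    · rw [dsort, dsort_eq_self c hpc]
      simp only [List.length_cons, hlen]
      omega
    · rw [dsort, dsort_eq_self c hpc]

-- ---- B-side: flatten form, membership, strict sortedness -----------------------------

def distinctOf (elements : List String) : List String :=
  PySem.List.sorted (PySem.Set.ofList elements) (fun x => x)

lemma genB_eq (elements : List String) (r : Int) :
    generate_species_keys_alt elements r =
      (distinctOf elements).flatMap (fun el =>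
        (PySem.List.combinations ((distinctOf elements).filter (fun e => e != el)) (r - 1).toNat).map
          (fun combo => el :: combo)) := by
  show (distinctOf elements).foldl _ [] = _
  rw [PySem.List.foldl_append_eq_flatMap]
  simp only [List.nil_append]
  rfl

lemma mem_distinctOf (elements : List String) (x : String) :
    x ∈ distinctOf elements ↔ x ∈ elements := by
  rw [distinctOf, PySem.List.mem_sorted, PySem.Set.mem_ofList]

lemma distinctOf_pairwise (elements : List String) : (distinctOf elements).Pairwise (· < ·) :=
  sorted_ofList_str_pairwise_lt elements

lemma mem_keysB (elements : List String) (k : Nat) (y : List String) :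
    (y ∈ (distinctOf elements).flatMap (fun el =>
        (PySem.List.combinations ((distinctOf elements).filter (fun e => e != el)) k).map
          (fun combo => el :: combo))) ↔ IsKey elements k y := by
  simp only [List.mem_flatMap, List.mem_map]
  constructor
  · rintro ⟨el, hel, c, hc, rfl⟩
    obtain ⟨hsub, hlen⟩ := (PySem.List.mem_combinations_iff _ _ c).mp hc
    have hfp : ((distinctOf elements).filter (fun e => e != el)).Pairwise (· < ·) :=
      (distinctOf_pairwise elements).filter _
    refine ⟨el, c, rfl, (mem_distinctOf elements el).mp hel, hfp.sublist hsub, hlen, ?_⟩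
    intro x hx
    have := hsub.mem hx
    have h2 := List.mem_filter.mp this
    exact ⟨(mem_distinctOf elements x).mp h2.1, by simpa using h2.2⟩
  · rintro ⟨el, c, rfl, hel, hpc, hlen, hmem⟩
    refine ⟨el, (mem_distinctOf elements el).mpr hel, c, ?_, rfl⟩
    refine (PySem.List.mem_combinations_iff _ _ c).mpr ⟨?_, hlen⟩
    apply sublist_of_strict _ c ((distinctOf_pairwise elements).filter _) hpc
    intro x hx
    refine List.mem_filter.mpr ⟨(mem_distinctOf elements x).mpr (hmem x hx).1, ?_⟩
    simpa using (hmem x hx).2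

lemma keysB_pairwise (elements : List String) (k : Nat) :
    ((distinctOf elements).flatMap (fun el =>
        (PySem.List.combinations ((distinctOf elements).filter (fun e => e != el)) k).map
          (fun combo => el :: combo))).Pairwise (· < ·) := by
  apply List.pairwise_flatMap.mpr
  refine ⟨?_, ?_⟩
  · intro el _
    rw [List.pairwise_map]
    have hfp : ((distinctOf elements).filter (fun e => e != el)).Pairwise (· < ·) :=
      (distinctOf_pairwise elements).filter _
    exact (comb_pairwise _ hfp k).imp (fun h => List.cons_lt_cons_self.mpr h)
  · apply (distinctOf_pairwise elements).imp_of_mem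
    intro el1 el2 _ _ h12 x hx y hy
    obtain ⟨c1, _, rfl⟩ := List.mem_map.mp hx
    obtain ⟨c2, _, rfl⟩ := List.mem_map.mp hy
    exact List.cons_lt_cons_iff.mpr (Or.inl h12)

-- ===== VERDICT (by name: the statement is the Claim_ definition above) =====
theorem generate_species_keys_spec : Claim_equal_generate_species_keys := by
  intro elements r _ hpre
  unfold Spec_generate_species_keys
  rcases hpre with rfl | hr
  · rfl
  · set k := (r - 1).toNat with hk
    rw [genA_eq, genB_eq]
    apply sortedLS_eq_of
    · apply (List.perm_ext_iff_of_nodup ((keysB_pairwise elements k).nodup) ?_).mpr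
      · intro y
        rw [mem_keysB, ← mem_keysA elements r hr y]
      · exact nodup_outer_fold elements r elements PySem.Set.empty (by simp [PySem.Set.empty])
    · exact keysB_pairwise elements k
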